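-- pv_equiv track=rewrite | github.com/joshuashevchuk1/LeetHackerQuestionsStudy | concepts/guidelines.py | countTheNumOfKFreeSubsets
-- ===== SOURCE A (Python) =====
-- def countTheNumOfKFreeSubsets(nums: list[int], k: int) -> int:
--     nums.sort()
--     n = len(nums)
--     dp = [1] * n  # Base case: each element alone forms a valid subset
--
--     for i in range(n):
--         for j in range(i):
--             if abs(nums[i] - nums[j]) != k:
--                 dp[i] += dp[j]
--
--     return sum(dp)
-- ===== SOURCE B (Python) =====
-- def countTheNumOfKFreeSubsets(nums: list[int], k: int) -> int:
--     total = 0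
--     bucket = {}  # value -> sum of dp over earlier occurrences of that value
--     for v in sorted(nums):
--         dp = 1 + total - bucket.get(v - k, 0)
--         total += dp
--         bucket[v] = bucket.get(v, 0) + dp
--     return total
-- ===== Notes on version B (the rewrite author's own statement) =====
-- stated objective: faster
-- what changed: Replaced the O(n^2) nested loop over earlier indices by a single pass over the sorted list keeping a running dp prefix sum and a dict mapping each value to the dp-sum of its occurrences, so the excluded |diff|=k term is subtracted in O(1).
import Mathlib
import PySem

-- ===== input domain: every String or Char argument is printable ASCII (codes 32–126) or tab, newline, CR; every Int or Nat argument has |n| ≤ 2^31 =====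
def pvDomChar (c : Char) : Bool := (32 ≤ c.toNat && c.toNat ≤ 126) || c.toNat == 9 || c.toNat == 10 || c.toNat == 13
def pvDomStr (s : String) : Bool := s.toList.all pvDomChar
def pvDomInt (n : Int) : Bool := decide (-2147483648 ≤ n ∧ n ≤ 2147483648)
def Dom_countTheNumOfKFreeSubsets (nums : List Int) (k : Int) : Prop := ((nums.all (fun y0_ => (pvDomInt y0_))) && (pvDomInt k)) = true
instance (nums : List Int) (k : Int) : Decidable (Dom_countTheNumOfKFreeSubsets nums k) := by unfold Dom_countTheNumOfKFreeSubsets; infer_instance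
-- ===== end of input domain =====

-- B replaces A's O(n^2) nested DP loop by one pass over the sorted list with a running
-- dp prefix sum and a dict value -> dp-sum (objective: faster, asymptotic).
-- A sorts `nums` in place (Python side effect); the equivalence proved here is about the RETURN value only.

-- ===== PORT A =====
-- inner loop body: 'if abs(nums[i] - nums[j]) != k: dp[i] += dp[j]'
def pvInnerF (s : List Int) (k : Int) (i : Int) (dp : List Int) (j : Int) : List Int :=
  if |PySem.List.pyGetD s i 0 - PySem.List.pyGetD s j 0| ≠ k then
    PySem.List.pySetD dp i (PySem.List.pyGetD dp i 0 + PySem.List.pyGetD dp j 0)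
  else dp

-- outer loop body: 'for j in range(i): …'
def pvOuterF (s : List Int) (k : Int) (dp : List Int) (i : Int) : List Int :=
  (PySem.List.pyRange 0 i 1).foldl (pvInnerF s k i) dp

def countTheNumOfKFreeSubsets (nums : List Int) (k : Int) : Int :=
  let s := PySem.List.sorted nums (fun x => x) false
  let n := s.length
  let dp0 : List Int := List.replicate n 1
  let dp := (PySem.List.pyRange 0 (n : Int) 1).foldl (pvOuterF s k) dp0
  dp.sum

-- ===== PORT B =====
-- loop body of Source B: dp = 1 + total - bucket.get(v - k, 0); total += dp; bucket[v] = bucket.get(v, 0) + dp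
def pvBStep (k : Int) (acc : Int × PySem.Dict Int Int) (v : Int) : Int × PySem.Dict Int Int :=
  let dp := 1 + acc.1 - acc.2.getD (v - k) 0
  (acc.1 + dp, acc.2.insert v (acc.2.getD v 0 + dp))

def countTheNumOfKFreeSubsets_alt (nums : List Int) (k : Int) : Int :=
  ((PySem.List.sorted nums (fun x => x) false).foldl (pvBStep k) (0, PySem.Dict.empty)).1

-- ===== PRECONDITION & SPEC =====
def Spec_countTheNumOfKFreeSubsets (nums : List Int) (k : Int) (out : Int) : Prop := out = countTheNumOfKFreeSubsets_alt nums k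
instance (nums : List Int) (k : Int) (out : Int) : Decidable (Spec_countTheNumOfKFreeSubsets nums k out) := by unfold Spec_countTheNumOfKFreeSubsets; infer_instance

-- ===== CLAIM (what is proved, stated in full; the proofs are below) =====
def Claim_equal_countTheNumOfKFreeSubsets : Prop := ∀ (nums : List Int) (k : Int), Dom_countTheNumOfKFreeSubsets nums k → Spec_countTheNumOfKFreeSubsets nums k (countTheNumOfKFreeSubsets nums k)

-- ===== LEMMAS AND PROOFS =====

-- The common mathematical object: the list of (value, dp-value) pairs of the DP
-- dp_i = 1 + Σ_{j<i, |s_i - s_j| ≠ k} dp_j over a list s, built left to right.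
def pvNewdp (k v : Int) (done : List (Int × Int)) : Int :=
  1 + (done.map (fun p => if |v - p.1| ≠ k then p.2 else 0)).sum

def pvDpPairs (k : Int) (done : List (Int × Int)) : List Int → List (Int × Int)
  | [] => done
  | v :: rest => pvDpPairs k (done ++ [(v, pvNewdp k v done)]) rest

lemma pvDpPairs_append_singleton (k : Int) (done : List (Int × Int)) (l : List Int) (v : Int) :
    pvDpPairs k done (l ++ [v]) = pvDpPairs k done l ++ [(v, pvNewdp k v (pvDpPairs k done l))] := by
  induction l generalizing done with
  | nil => simp [pvDpPairs]
  | cons x xs ih => simp [pvDpPairs, ih]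

lemma pvDpPairs_map_fst (k : Int) (done : List (Int × Int)) (l : List Int) :
    (pvDpPairs k done l).map Prod.fst = done.map Prod.fst ++ l := by
  induction l generalizing done with
  | nil => simp [pvDpPairs]
  | cons x xs ih => simp [pvDpPairs, ih]

-- ---- A side ----

lemma pvGetD_set_ne (l : List Int) (i j : Nat) (x : Int) (h : j ≠ i) :
    (l.set i x).getD j 0 = l.getD j 0 := by
  rw [List.getD_eq_getElem?_getD, List.getD_eq_getElem?_getD, List.getElem?_set_ne (by omega)]

lemma pvGetD_set_self (l : List Int) (i : Nat) (x : Int) (h : i < l.length) :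
    (l.set i x).getD i 0 = x := by
  simp [List.getD_eq_getElem?_getD, h]

-- inner loop: only index i is written, indices j < m ≤ i are read
lemma pvInner_eq (s : List Int) (k : Int) (i m : Nat) (dp : List Int)
    (hm : m ≤ i) (hi : i < dp.length) :
    (PySem.List.pyRange 0 (m : Int) 1).foldl (pvInnerF s k (i : Int)) dp
      = dp.set i (dp.getD i 0 +
          ((List.range m).map (fun j =>
            if |s.getD i 0 - s.getD j 0| ≠ k then dp.getD j 0 else 0)).sum) := by
  induction m with
  | zero =>
      have h0 : PySem.List.pyRange 0 ((0:Nat):Int) 1 = [] := PySem.List.pyRange_one_eq_nil (by omega)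
      rw [h0]
      simp [List.getD_eq_getElem?_getD, List.getElem?_eq_getElem hi]
  | succ m ih =>
      have hsplit : PySem.List.pyRange 0 ((m : Int) + 1) 1
          = PySem.List.pyRange 0 (m : Int) 1 ++ [(m : Int)] :=
        PySem.List.pyRange_one_succ_right (by omega)
      have hcast : ((m + 1 : Nat) : Int) = (m : Int) + 1 := by push_cast; ring
      rw [hcast, hsplit, List.foldl_append, ih (by omega)]
      simp only [List.foldl_cons, List.foldl_nil, pvInnerF]
      rw [List.range_succ]
      simp only [PySem.List.pyGetD_natCast, List.map_append, List.map_cons, List.map_nil,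
        List.sum_append, List.sum_cons, List.sum_nil]
      have hne : m ≠ i := by omega
      by_cases hc : |s.getD i 0 - s.getD m 0| ≠ k
      · simp only [if_pos hc, PySem.List.pySetD_natCast]
        rw [pvGetD_set_self _ _ _ (by simpa using hi), pvGetD_set_ne _ _ _ _ hne]
        rw [List.set_set]
        ring_nf
      · simp only [if_neg hc]
        ring_nf

lemma pvGetD_eq {α : Type} (l : List α) (j : Nat) (d : α) (h : j < l.length) :
    l.getD j d = l[j] := by
  simp [List.getD_eq_getElem?_getD, List.getElem?_eq_getElem h]

lemma pvSum_range (L : List (Int × Int)) (f : Int × Int → Int) :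
    ((List.range L.length).map (fun j => f (L.getD j (0, 0)))).sum = (L.map f).sum := by
  induction L with
  | nil => simp
  | cons x t ih =>
      rw [List.length_cons, List.range_succ_eq_map]
      simp only [List.map_cons, List.map_map, List.sum_cons, List.getD_cons_zero]
      rw [← ih]
      congr 1

-- after m outer iterations the dp array is: dp-values of the first m elements, then 1s
lemma pvOuter_eq (s : List Int) (k : Int) (m : Nat) (hm : m ≤ s.length) :
    (PySem.List.pyRange 0 (m : Int) 1).foldl (pvOuterF s k) (List.replicate s.length 1)
      = (pvDpPairs k [] (s.take m)).map Prod.snd ++ List.replicate (s.length - m) 1 := by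
  induction m with
  | zero =>
      rw [PySem.List.pyRange_one_eq_nil (by omega)]
      simp [pvDpPairs]
  | succ m ih =>
      have hmlt : m < s.length := by omega
      set D := pvDpPairs k [] (s.take m) with hD
      have hDfst : D.map Prod.fst = s.take m := by
        simpa using pvDpPairs_map_fst k [] (s.take m)
      have hDlen : D.length = m := by
        have := congrArg List.length hDfst
        simpa [List.length_take, Nat.min_eq_left (le_of_lt hmlt)] using this
      set dp := D.map Prod.snd ++ List.replicate (s.length - m) 1 with hdp
      have hdplen : dp.length = s.length := by
        simp [hdp, hDlen]; omega
      have hcast : ((m + 1 : Nat) : Int) = (m : Int) + 1 := by push_cast; ring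
      rw [hcast, PySem.List.pyRange_one_succ_right (by omega), List.foldl_append,
        ih (by omega), List.foldl_cons, List.foldl_nil]
      show pvOuterF s k dp (m : Int) = _
      unfold pvOuterF
      rw [pvInner_eq s k m m dp le_rfl (by omega)]
      -- dp[m] is still the initial 1
      have hdpm : dp.getD m 0 = 1 := by
        rw [pvGetD_eq dp m 0 (by omega)]
        show (D.map Prod.snd ++ List.replicate (s.length - m) 1)[m]'(by simp [hDlen]; omega) = 1
        rw [List.getElem_append_right (by simp [hDlen]), List.getElem_replicate]
      -- each summand j < m reads the already-final dp value D[j].2 of s[j] = D[j].1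
      have hsummand : ∀ j ∈ List.range m,
          (if |s.getD m 0 - s.getD j 0| ≠ k then dp.getD j 0 else 0)
            = (fun p => if |s.getD m 0 - p.1| ≠ k then p.2 else 0) (D.getD j (0, 0)) := by
        intro j hj
        have hjm : j < m := List.mem_range.mp hj
        have hDj : D.getD j (0, 0) = D[j] := pvGetD_eq D j (0, 0) (by omega)
        have hsj : s.getD j 0 = D[j].1 := by
          rw [pvGetD_eq s j 0 (by omega)]
          have := congrArg (fun l => l[j]?) hDfst
          simp only [List.getElem?_map, List.getElem?_take] at this
          have h1 : D[j]? = some D[j] := List.getElem?_eq_getElem (by omega)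
          have h2 : s[j]? = some s[j] := List.getElem?_eq_getElem (by omega)
          rw [h1] at this
          simp [hjm, h2] at this
          exact this.symm
        have hdpj : dp.getD j 0 = D[j].2 := by
          rw [pvGetD_eq dp j 0 (by omega)]
          show (D.map Prod.snd ++ List.replicate (s.length - m) 1)[j]'(by simp [hDlen]; omega) = D[j].2
          rw [List.getElem_append_left (by simp [hDlen]; omega), List.getElem_map]
        rw [hsj, hdpj, hDj]
      rw [List.map_congr_left hsummand]
      have hrange : (List.range m).map (fun j =>
            (fun p => if |s.getD m 0 - p.1| ≠ k then p.2 else 0) (D.getD j (0, 0)))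
          = (List.range D.length).map (fun j =>
            (fun p => if |s.getD m 0 - p.1| ≠ k then p.2 else 0) (D.getD j (0, 0))) := by
        rw [hDlen]
      rw [hrange, pvSum_range D (fun p => if |s.getD m 0 - p.1| ≠ k then p.2 else 0)]
      -- identify the written value with pvNewdp of s[m]
      have hsm : s.getD m 0 = s[m] := pvGetD_eq s m 0 hmlt
      have htake : s.take (m + 1) = s.take m ++ [s[m]] := by
        rw [List.take_add_one]
        simp [List.getElem?_eq_getElem hmlt]
      rw [htake, pvDpPairs_append_singleton, ← hD]
      have hnew : pvNewdp k s[m] D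
          = 1 + (D.map (fun p => if |s.getD m 0 - p.1| ≠ k then p.2 else 0)).sum := by
        rw [pvNewdp, hsm]
      -- place the new value: set at index m = (D.map snd).length splits the replicate
      have hrep : List.replicate (s.length - m) (1 : Int)
          = 1 :: List.replicate (s.length - (m + 1)) 1 := by
        have : s.length - m = (s.length - (m + 1)) + 1 := by omega
        rw [this, List.replicate_succ]
      rw [hdpm, hdp, hrep, List.set_append_right _ _ (by simp [hDlen])]
      simp [hDlen, hnew]

lemma pvA_eq (nums : List Int) (k : Int) :
    countTheNumOfKFreeSubsets nums k
      = ((pvDpPairs k [] (PySem.List.sorted nums (fun x => x) false)).map Prod.snd).sum := by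
  simp only [countTheNumOfKFreeSubsets]
  rw [pvOuter_eq (PySem.List.sorted nums (fun x => x) false) k
    (PySem.List.sorted nums (fun x => x) false).length le_rfl]
  simp
  rw [List.take_of_length_le (by simp)]

-- ---- B side ----

lemma pvNewdp_sub (k v : Int) (done : List (Int × Int)) (h : ∀ p ∈ done, p.1 ≤ v) :
    pvNewdp k v done
      = 1 + (done.map Prod.snd).sum - (done.map (fun p => if p.1 = v - k then p.2 else 0)).sum := by
  induction done with
  | nil => simp [pvNewdp]
  | cons p t ih =>
      have hp : p.1 ≤ v := h p (by simp)
      have iht := ih (fun q hq => h q (by simp [hq]))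
      simp only [pvNewdp, List.map_cons, List.sum_cons] at *
      have habs : |v - p.1| = v - p.1 := abs_of_nonneg (by omega)
      by_cases hc : p.1 = v - k
      · rw [if_neg (by rw [habs]; omega), if_pos hc]; omega
      · rw [if_pos (by rw [habs]; omega), if_neg hc]; omega

lemma pvB_loop (k : Int) (rest : List Int) (done : List (Int × Int)) (t : Int) (d : PySem.Dict Int Int)
    (ht : t = (done.map Prod.snd).sum)
    (hd : ∀ x, d.getD x 0 = (done.map (fun p => if p.1 = x then p.2 else 0)).sum)
    (hord : ∀ p ∈ done, ∀ v ∈ rest, p.1 ≤ v)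
    (hrest : rest.Pairwise (· ≤ ·)) :
    (rest.foldl (pvBStep k) (t, d)).1 = ((pvDpPairs k done rest).map Prod.snd).sum := by
  induction rest generalizing done t d with
  | nil => simpa [pvDpPairs] using ht
  | cons v rest ih =>
      have hvle : ∀ p ∈ done, p.1 ≤ v := fun p hp => hord p hp v (by simp)
      have hdp : 1 + t - d.getD (v - k) 0 = pvNewdp k v done := by
        rw [ht, hd, pvNewdp_sub k v done hvle]
      simp only [List.foldl_cons, pvBStep, pvDpPairs]
      rw [hdp]
      apply ih (done ++ [(v, pvNewdp k v done)])
      · simp [ht]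
      · intro x
        by_cases hx : x = v
        · subst hx
          rw [PySem.Dict.getD_insert_self, hd]
          simp
        · rw [PySem.Dict.getD_insert_of_ne _ _ _ hx, hd]
          simp [Ne.symm hx]
      · intro p hp w hw
        rcases List.mem_append.mp hp with hp | hp
        · exact hord p hp w (by simp [hw])
        · simp at hp
          rcases hrest with _ | ⟨hhead, _⟩
          have : p.1 = v := by rw [hp]
          rw [this]
          exact hhead w hw
      · exact (List.pairwise_cons.mp hrest).2

lemma pvB_eq (nums : List Int) (k : Int) :
    countTheNumOfKFreeSubsets_alt nums k
      = ((pvDpPairs k [] (PySem.List.sorted nums (fun x => x) false)).map Prod.snd).sum := by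
  unfold countTheNumOfKFreeSubsets_alt
  apply pvB_loop
  · simp
  · intro x; simp [PySem.Dict.getD, PySem.Dict.get?, PySem.Dict.empty]
  · intro p hp; simp at hp
  · simpa using PySem.List.sorted_pairwise nums (fun x => x)

-- ===== VERDICT (by name: the statement is the Claim_ definition above) =====
theorem countTheNumOfKFreeSubsets_spec : Claim_equal_countTheNumOfKFreeSubsets := by
  intro nums k _
  unfold Spec_countTheNumOfKFreeSubsets
  rw [pvA_eq, pvB_eq]
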